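-- pv_equiv track=rewrite | github.com/justdoths-dev/trading-bot | src/research/diagnostics/analyzer_counterfactual_strictness_report.py | _ordered_counter
-- ===== SOURCE A (Python) =====
-- from collections import Counter
--
-- def _ordered_counter(
--     counter_like: Counter[str] | dict[str, int],
--     preferred: tuple[str, ...] | None = None,
-- ) -> dict[str, int]:
--     counter = dict(counter_like)
--     ordered: dict[str, int] = {}
--     if preferred is not None:
--         for key in preferred:
--             value = counter.pop(key, 0)
--             if value:
--                 ordered[key] = value
--     for key, value in sorted(counter.items(), key=lambda item: (-item[1], item[0])):
--         if value:
--             ordered[key] = value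
--     return ordered
-- ===== SOURCE B (Python) =====
-- from collections import Counter
--
--
-- def _ordered_counter(
--     counter_like: Counter[str] | dict[str, int],
--     preferred: tuple[str, ...] | None = None,
-- ) -> dict[str, int]:
--     seq = preferred or ()
--     rank: dict[str, int] = {}
--     for i, key in enumerate(seq):
--         rank.setdefault(key, i)
--     big = len(seq)
--     return {
--         key: value
--         for key, value in sorted(
--             dict(counter_like).items(),
--             key=lambda item: (rank.get(item[0], big), -item[1], item[0]),
--         )
--         if value
--     }
-- ===== Notes on version B (the rewrite author's own statement) =====
-- stated objective: simpler
-- what changed: Replaces A's explicit preferred-placement pop loop followed by a second sort of the remainder with one composite-key sorted() pass over all items (first-occurrence rank of the key in preferred, then -value, then key) feeding a single filtering dict comprehension.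
import Mathlib
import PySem

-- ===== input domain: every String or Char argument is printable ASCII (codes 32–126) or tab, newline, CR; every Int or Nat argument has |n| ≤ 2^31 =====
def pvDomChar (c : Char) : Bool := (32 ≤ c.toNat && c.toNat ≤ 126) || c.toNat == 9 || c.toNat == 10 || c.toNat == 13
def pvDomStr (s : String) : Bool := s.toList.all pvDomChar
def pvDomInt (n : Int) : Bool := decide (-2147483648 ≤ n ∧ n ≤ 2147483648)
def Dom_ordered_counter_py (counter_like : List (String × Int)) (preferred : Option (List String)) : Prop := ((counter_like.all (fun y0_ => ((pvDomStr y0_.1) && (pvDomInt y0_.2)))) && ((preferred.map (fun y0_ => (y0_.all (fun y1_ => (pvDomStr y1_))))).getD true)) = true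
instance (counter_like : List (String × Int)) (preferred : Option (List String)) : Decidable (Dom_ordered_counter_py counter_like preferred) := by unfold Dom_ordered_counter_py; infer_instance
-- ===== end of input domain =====

-- B replaces A's preferred-placement pop loop + second sort by one composite-key sorted() pass
-- (rank in preferred, then -value, then key) feeding a single filtering dict comprehension; same cost, shorter.


-- ===== PORT A =====
def ordered_counter_py (counter_like : List (String × Int)) (preferred : Option (List String)) : List (String × Int) :=
  let counter := PySem.Dict.ofList counter_like
  -- 'ordered = {}' then the 'if preferred is not None: for key in preferred: …' loop over (counter, ordered)
  let st :=
    match preferred with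
    | none => (counter, (PySem.Dict.empty : PySem.Dict String Int))
    | some ps =>
        ps.foldl
          (fun (s : PySem.Dict String Int × PySem.Dict String Int) key =>
            match s.1.pop? key with                          -- value = counter.pop(key, 0)
            | some (value, c) => (c, if value ≠ 0 then s.2.insert key value else s.2)
            | none => (s.1, s.2))                            -- missing key: default 0 is falsy
          (counter, PySem.Dict.empty)
  -- for key, value in sorted(counter.items(), key=lambda item: (-item[1], item[0])): if value: ordered[key] = value
  let ordered :=
    (PySem.List.sorted2 st.1.items (fun item => -item.2) (fun item => item.1)).foldl
      (fun (d : PySem.Dict String Int) p => if p.2 ≠ 0 then d.insert p.1 p.2 else d) st.2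
  ordered.items

-- ===== PORT B =====
def ordered_counter_py_alt (counter_like : List (String × Int)) (preferred : Option (List String)) : List (String × Int) :=
  let seq := preferred.getD []                               -- seq = preferred or ()
  let rank :=                                                -- for i, key in enumerate(seq): rank.setdefault(key, i)
    (PySem.List.enumerate seq).foldl
      (fun (d : PySem.Dict String Int) p => d.setdefault p.2 p.1) PySem.Dict.empty
  let big : Int := seq.length
  -- Python's 3-tuple sort key is ported through Prod.Lex (PySem.List.sorted2 covers only pairs):
  -- exact, since Python tuple comparison and Lean's String '<' are both lexicographic.
  let s := PySem.List.sorted (PySem.Dict.ofList counter_like).items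
      (fun item => toLex (rank.getD item.1 big, toLex (-item.2, item.1)))
  -- {key: value for key, value in s if value}
  (s.foldl (fun (d : PySem.Dict String Int) p => if p.2 ≠ 0 then d.insert p.1 p.2 else d)
      PySem.Dict.empty).items

-- ===== PRECONDITION & SPEC =====
def Spec_ordered_counter_py (counter_like : List (String × Int)) (preferred : Option (List String)) (out : List (String × Int)) : Prop := out = ordered_counter_py_alt counter_like preferred
instance (counter_like : List (String × Int)) (preferred : Option (List String)) (out : List (String × Int)) : Decidable (Spec_ordered_counter_py counter_like preferred out) := by unfold Spec_ordered_counter_py; infer_instance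

-- ===== CLAIM (what is proved, stated in full; the proofs are below) =====
def Claim_equal_ordered_counter_py : Prop := ∀ (counter_like : List (String × Int)) (preferred : Option (List String)), Dom_ordered_counter_py counter_like preferred → Spec_ordered_counter_py counter_like preferred (ordered_counter_py counter_like preferred)

-- ===== LEMMAS AND PROOFS =====

def prefPairs : PySem.Dict String Int → List String → List (String × Int)
  | _, [] => []
  | c, k :: ks =>
    match c.get? k with
    | some v => (k, v) :: prefPairs (c.erase k) ks
    | none => prefPairs c ks

def idx : List String → String → Int
  | [], _ => 0
  | p :: ps, k => if p = k then 0 else idx ps k + 1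
theorem get?_erase (d : PySem.Dict String Int) (k k' : String) :
    (d.erase k).get? k' = if k' = k then none else d.get? k' := by
  obtain ⟨l⟩ := d
  induction l with
  | nil => simp [PySem.Dict.erase, PySem.Dict.get?]
  | cons p t ih =>
    simp only [PySem.Dict.erase, PySem.Dict.get?, List.filter_cons] at *
    by_cases h1 : p.1 = k <;> by_cases h2 : p.1 = k' <;>
      simp_all

theorem erase_of_get?_none (d : PySem.Dict String Int) (k : String) (h : d.get? k = none) :
    d.erase k = d := by
  obtain ⟨l⟩ := d
  simp only [PySem.Dict.get?, Option.map_eq_none_iff, List.find?_eq_none] at h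
  simp only [PySem.Dict.erase, PySem.Dict.mk.injEq]
  exact List.filter_eq_self.mpr (fun p hp => by simpa using fun hpk => (h p hp) (by simp [hpk]))

theorem nodup_keys_erase (d : PySem.Dict String Int) (k : String) (h : d.keys.Nodup) :
    (d.erase k).keys.Nodup := by
  obtain ⟨l⟩ := d
  simp only [PySem.Dict.keys, PySem.Dict.erase] at *
  exact h.sublist (List.Sublist.map _ (List.filter_sublist (l := l)))

theorem mem_prefPairs' (ps : List String) : ∀ (c : PySem.Dict String Int) (p : String × Int),
    p ∈ prefPairs c ps → c.get? p.1 = some p.2 ∧ p.1 ∈ ps := by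
  induction ps with
  | nil => intro c p h; simp [prefPairs] at h
  | cons k ks ih =>
    intro c p h
    unfold prefPairs at h
    cases hg : c.get? k with
    | some v =>
      rw [hg] at h
      rcases List.mem_cons.mp h with h | h
      · subst h; exact ⟨hg, List.mem_cons_self⟩
      · obtain ⟨h1, h2⟩ := ih _ _ h
        rw [get?_erase] at h1
        split at h1
        · exact absurd h1 (by simp)
        · exact ⟨h1, List.mem_cons_of_mem _ h2⟩
    | none =>
      rw [hg] at h
      obtain ⟨h1, h2⟩ := ih _ _ h
      exact ⟨h1, List.mem_cons_of_mem _ h2⟩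

theorem idx_lt_of_mem (ps : List String) (k : String) (h : k ∈ ps) :
    idx ps k < ps.length := by
  induction ps with
  | nil => simp at h
  | cons p t ih =>
    unfold idx
    by_cases hp : p = k
    · simp only [if_pos hp, List.length_cons]; positivity
    · rcases List.mem_cons.mp h with h' | h'
      · exact absurd h'.symm hp
      · simp only [if_neg hp, List.length_cons]
        have := ih h'; push_cast; omega

theorem idx_eq_of_not_mem (ps : List String) (k : String) (h : k ∉ ps) :
    idx ps k = ps.length := by
  induction ps with
  | nil => simp [idx]
  | cons p t ih =>
    unfold idx
    have hp : p ≠ k := fun hp => h (hp ▸ List.mem_cons_self)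
    rw [if_neg hp, ih (fun ht => h (List.mem_cons_of_mem _ ht))]
    simp only [List.length_cons]; push_cast; omega

theorem idx_nonneg (ps : List String) (k : String) : 0 ≤ idx ps k := by
  induction ps with
  | nil => simp [idx]
  | cons p t ih =>
    unfold idx; split
    · omega
    · omega

theorem idx_cons_of_ne (k x : String) (ks : List String) (h : x ≠ k) :
    idx (k :: ks) x = idx ks x + 1 := by
  conv_lhs => unfold idx
  rw [if_neg (fun hk => h hk.symm)]

theorem pairwise_idx_prefPairs (ps : List String) : ∀ (c : PySem.Dict String Int),
    (prefPairs c ps).Pairwise (fun a b => idx ps a.1 < idx ps b.1) := by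
  induction ps with
  | nil => intro c; simp [prefPairs]
  | cons k ks ih =>
    intro c
    unfold prefPairs
    cases hg : c.get? k with
    | some v =>
      refine List.Pairwise.cons ?_ ?_
      · intro b hb
        obtain ⟨h1, _⟩ := mem_prefPairs' ks _ b hb
        have hbk : b.1 ≠ k := by
          intro he; rw [get?_erase, if_pos he] at h1; exact absurd h1 (by simp)
        rw [idx_cons_of_ne _ _ _ hbk]
        have h0 : idx (k :: ks) ((k, v) : String × Int).1 = 0 := by unfold idx; simp
        have := idx_nonneg ks b.1; omega
      · refine (ih (c.erase k)).imp_of_mem ?_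
        intro a b ha hb hab
        have hak : a.1 ≠ k := by
          have h1 := (mem_prefPairs' ks _ a ha).1
          intro he; rw [get?_erase, if_pos he] at h1; exact absurd h1 (by simp)
        have hbk : b.1 ≠ k := by
          have h1 := (mem_prefPairs' ks _ b hb).1
          intro he; rw [get?_erase, if_pos he] at h1; exact absurd h1 (by simp)
        rw [idx_cons_of_ne _ _ _ hak, idx_cons_of_ne _ _ _ hbk]; omega
    | none =>
      refine (ih c).imp_of_mem ?_
      intro a b ha hb hab
      have hak : a.1 ≠ k := fun he =>
        absurd ((mem_prefPairs' ks _ a ha).1) (by rw [he, hg]; simp)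
      have hbk : b.1 ≠ k := fun he =>
        absurd ((mem_prefPairs' ks _ b hb).1) (by rw [he, hg]; simp)
      rw [idx_cons_of_ne _ _ _ hak, idx_cons_of_ne _ _ _ hbk]; omega

theorem items_perm_cons_erase (d : PySem.Dict String Int) (k : String) (v : Int)
    (hn : d.keys.Nodup) (h : d.get? k = some v) :
    d.items.Perm ((k, v) :: (d.erase k).items) := by
  obtain ⟨l⟩ := d
  induction l with
  | nil => simp [PySem.Dict.get?] at h
  | cons p t ih =>
    simp only [PySem.Dict.keys, List.map_cons, List.nodup_cons] at hn
    by_cases hb : p.1 = k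
    · have hv : p.2 = v := by
        simp only [PySem.Dict.get?, List.find?_cons, hb] at h
        simpa using h
      have hp : p = (k, v) := Prod.ext hb hv
      have hfil : t.filter (fun q => !q.1 == k) = t :=
        List.filter_eq_self.mpr (fun q hq => by
          simp only [Bool.not_eq_eq_eq_not, Bool.not_true, beq_eq_false_iff_ne, ne_eq]
          intro he
          exact hn.1 (by rw [hb, ← he]; exact List.mem_map_of_mem hq))
      simp only [PySem.Dict.erase, List.filter_cons, hb]
      simp [hp, hfil]
    · have h' : (PySem.Dict.mk t).get? k = some v := by
        simp only [PySem.Dict.get?, List.find?_cons] at h ⊢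
        rw [show (p.1 == k) = false from beq_eq_false_iff_ne.mpr hb] at h
        exact h
      have := ih hn.2 h'
      simp only [PySem.Dict.erase, List.filter_cons,
        show (p.1 == k) = false from beq_eq_false_iff_ne.mpr hb]
      simp only [Bool.not_false, if_pos]
      exact (this.cons p).trans (List.Perm.swap _ _ _)

theorem prefPairs_append_eraseAll_perm (ps : List String) : ∀ (c : PySem.Dict String Int),
    c.keys.Nodup → (prefPairs c ps ++ (ps.foldl PySem.Dict.erase c).items).Perm c.items := by
  induction ps with
  | nil => intro c _; simp [prefPairs]
  | cons k ks ih =>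
    intro c hn
    unfold prefPairs
    simp only [List.foldl_cons]
    cases hg : c.get? k with
    | some v =>
      have h1 := ih (c.erase k) (nodup_keys_erase c k hn)
      have h2 := items_perm_cons_erase c k v hn hg
      simpa using ((h1.cons (k, v)).trans h2.symm)
    | none =>
      rw [erase_of_get?_none c k hg]
      exact ih c hn

theorem mem_eraseAll (ps : List String) : ∀ (c : PySem.Dict String Int) (p : String × Int),
    p ∈ (ps.foldl PySem.Dict.erase c).items → p ∈ c.items ∧ p.1 ∉ ps := by
  induction ps with
  | nil => intro c p h; simpa using h
  | cons k ks ih =>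
    intro c p h
    simp only [List.foldl_cons] at h
    obtain ⟨h1, h2⟩ := ih (c.erase k) p h
    simp only [PySem.Dict.erase, List.mem_filter] at h1
    obtain ⟨h3, h4⟩ := h1
    refine ⟨h3, ?_⟩
    simp only [List.mem_cons, not_or]
    exact ⟨by simpa using h4, h2⟩

theorem nodup_keys_eraseAll (ps : List String) : ∀ (c : PySem.Dict String Int),
    c.keys.Nodup → (ps.foldl PySem.Dict.erase c).keys.Nodup := by
  induction ps with
  | nil => intro c h; simpa using h
  | cons k ks ih => intro c h; exact ih _ (nodup_keys_erase c k h)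

theorem get?_setdefault (d : PySem.Dict String Int) (k k' : String) (v : Int) :
    (d.setdefault k v).get? k' =
      match d.get? k' with
      | some w => some w
      | none => if k' = k then some v else none := by
  unfold PySem.Dict.setdefault
  by_cases hc : d.contains k
  · rw [if_pos hc]
    cases hg : d.get? k' with
    | some w => rfl
    | none =>
      show none = if k' = k then some v else none
      by_cases he : k' = k
      · exfalso
        rw [PySem.Dict.contains_eq_isSome_get?] at hc
        rw [← he, hg] at hc; simp at hc
      · rw [if_neg he]
  · rw [if_neg hc]
    cases hg : d.get? k' with
    | some w =>
      show _ = some w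
      simp only [PySem.Dict.get?] at hg
      rw [Option.map_eq_some_iff] at hg
      obtain ⟨p, hp, hpe⟩ := hg
      show Option.map (fun x => x.2) (List.find? (fun p => p.1 == k') (d.items ++ [(k, v)])) = some w
      rw [List.find?_append, hp]
      simp [hpe]
    | none =>
      simp only [PySem.Dict.get?, Option.map_eq_none_iff] at hg
      show Option.map (fun x => x.2) (List.find? (fun p => p.1 == k') (d.items ++ [(k, v)])) = if k' = k then some v else none
      rw [List.find?_append, hg]
      by_cases he : k' = k
      · simp [List.find?, he]
      · simp [List.find?, show (k == k') = false from beq_eq_false_iff_ne.mpr (Ne.symm he), he]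

theorem rank_get? (ps : List String) : ∀ (s : Int) (d : PySem.Dict String Int) (k : String),
    ((PySem.List.enumerate ps s).foldl (fun d p => d.setdefault p.2 p.1) d).get? k =
      match d.get? k with
      | some v => some v
      | none => if k ∈ ps then some (s + idx ps k) else none := by
  induction ps with
  | nil => intro s d k; simp [PySem.List.enumerate]; cases d.get? k <;> rfl
  | cons x t ih =>
    intro s d k
    have hen : PySem.List.enumerate (x :: t) s = (s, x) :: PySem.List.enumerate t (s + 1) := by
      cases t <;> rfl
    rw [hen]
    simp only [List.foldl_cons]
    rw [ih (s + 1) (d.setdefault x s) k]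
    rw [get?_setdefault]
    cases hg : d.get? k with
    | some w => rfl
    | none =>
      by_cases he : k = x
      · subst he
        have h0 : idx (k :: t) k = 0 := by unfold idx; simp
        simp [h0, List.mem_cons]
      · simp only [if_neg he]
        rw [idx_cons_of_ne _ _ _ he]
        by_cases hm : k ∈ t
        · simp only [List.mem_cons, he, false_or, hm, if_pos]
          congr 1; omega
        · simp [List.mem_cons, he, hm]

theorem rank_getD (ps : List String) (k : String) :
    ((PySem.List.enumerate ps).foldl
        (fun (d : PySem.Dict String Int) p => d.setdefault p.2 p.1) PySem.Dict.empty).getD k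
        (ps.length : Int) = idx ps k := by
  rw [PySem.Dict.getD_eq_get?_getD, rank_get? ps 0 PySem.Dict.empty k]
  rw [PySem.Dict.get?_empty]
  by_cases hm : k ∈ ps
  · simp [hm]
  · simp [hm, idx_eq_of_not_mem ps k hm]

theorem sorted2A_eq_sorted_lex (xs : List (String × Int)) :
    PySem.List.sorted2 xs (fun p => -p.2) (fun p => p.1) =
      PySem.List.sorted xs (fun p => toLex (-p.2, p.1)) := by
  unfold PySem.List.sorted2 PySem.List.sorted
  simp only [if_neg Bool.false_ne_true]
  congr 1
  funext acc q
  congr 1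
  funext a b
  by_cases h1 : -a.2 < -b.2
  · simp [h1, Prod.Lex.toLex_lt_toLex]
  · by_cases h2 : -b.2 < -a.2
    · have hne : ¬(-a.2 = -b.2) := by omega
      simp [h1, h2, Prod.Lex.toLex_lt_toLex, hne]
    · have he : -a.2 = -b.2 := by omega
      simp [Prod.Lex.toLex_lt_toLex, he]

theorem loopA_eq (ps : List String) : ∀ (c o : PySem.Dict String Int),
    c.keys.Nodup → (∀ p ∈ prefPairs c ps, o.contains p.1 = false) →
    (ps.foldl
        (fun (s : PySem.Dict String Int × PySem.Dict String Int) key =>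
          match s.1.pop? key with
          | some (value, c) => (c, if value ≠ 0 then s.2.insert key value else s.2)
          | none => (s.1, s.2)) (c, o)) =
      (ps.foldl PySem.Dict.erase c,
       PySem.Dict.mk (o.items ++ (prefPairs c ps).filter (fun p => decide (p.2 ≠ 0)))) := by
  induction ps with
  | nil =>
    intro c o _ _
    simp [prefPairs]
  | cons k ks ih =>
    intro c o hn ho
    simp only [List.foldl_cons]
    cases hg : c.get? k with
    | none =>
      have hstep : (match c.pop? k with
          | some (value, c') => (c', if value ≠ 0 then o.insert k value else o)
          | none => (c, o)) = (c, o) := by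
        simp [PySem.Dict.pop?, hg]
      have hpp : prefPairs c (k :: ks) = prefPairs c ks := by
        conv_lhs => unfold prefPairs; rw [hg]
      rw [hstep, erase_of_get?_none c k hg, ih c o hn (fun p hp => ho p (by rw [hpp]; exact hp))]
      rw [hpp]
    | some v =>
      have hpp : prefPairs c (k :: ks) = (k, v) :: prefPairs (c.erase k) ks := by
        conv_lhs => unfold prefPairs; rw [hg]
      have hstep : (match c.pop? k with
          | some (value, c') => (c', if value ≠ 0 then o.insert k value else o)
          | none => (c, o)) = (c.erase k, if v ≠ 0 then o.insert k v else o) := by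
        simp [PySem.Dict.pop?, hg]
      rw [hstep]
      have htail : ∀ p ∈ prefPairs (c.erase k) ks, p.1 ≠ k := by
        intro p hp he
        have h1 := (mem_prefPairs' ks _ p hp).1
        rw [get?_erase, if_pos he] at h1; exact absurd h1 (by simp)
      by_cases hv : v ≠ 0
      · rw [if_pos hv]
        have hoc : o.contains k = false := ho (k, v) (by rw [hpp]; exact List.mem_cons_self)
        have hfr : ∀ p ∈ prefPairs (c.erase k) ks, (o.insert k v).contains p.1 = false := by
          intro p hp
          rw [PySem.Dict.contains_insert]
          simp only [Bool.or_eq_false_iff]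
          exact ⟨beq_eq_false_iff_ne.mpr (htail p hp),
            ho p (by rw [hpp]; exact List.mem_cons_of_mem _ hp)⟩
        rw [ih (c.erase k) (o.insert k v) (nodup_keys_erase c k hn) hfr]
        rw [hpp, PySem.Dict.items_insert_of_not_contains _ _ hoc]
        simp [hv]
      · rw [if_neg hv]
        rw [ih (c.erase k) o (nodup_keys_erase c k hn)
          (fun p hp => ho p (by rw [hpp]; exact List.mem_cons_of_mem _ hp))]
        rw [hpp]
        simp only [List.filter_cons]
        have : ¬v ≠ 0 := hv
        simp [this]

theorem sortedB_eq (cl : List (String × Int)) (ps : List String) :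
    PySem.List.sorted (PySem.Dict.ofList cl).items
        (fun it => toLex (idx ps it.1, toLex (-it.2, it.1))) =
      prefPairs (PySem.Dict.ofList cl) ps ++
        PySem.List.sorted (ps.foldl PySem.Dict.erase (PySem.Dict.ofList cl)).items
          (fun p => toLex (-p.2, p.1)) := by
  set c := PySem.Dict.ofList cl with hc
  have hnodup : c.keys.Nodup := PySem.Dict.nodup_keys_ofList cl
  set rest := ps.foldl PySem.Dict.erase c with hrest
  set sr := PySem.List.sorted rest.items (fun p => toLex (-p.2, p.1)) with hsr
  apply PySem.List.sorted_eq_of_perm_of_pairwise_lt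
  · exact ((PySem.List.sorted_perm _ _ _).append_left (prefPairs c ps)).trans
      (prefPairs_append_eraseAll_perm ps c hnodup)
  · rw [List.pairwise_append]
    refine ⟨?_, ?_, ?_⟩
    · refine (pairwise_idx_prefPairs ps c).imp ?_
      intro a b hab
      rw [Prod.Lex.toLex_lt_toLex]
      exact Or.inl hab
    · -- inside the sorted remainder: ranks are all ps.length, keys distinct
      have hpw : sr.Pairwise (fun a b =>
          toLex (-a.2, a.1) ≤ toLex (-b.2, b.1)) := PySem.List.sorted_pairwise _ _
      have hnd : (sr.map (fun p => p.1)).Nodup := by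
        have h1 : rest.keys.Nodup := nodup_keys_eraseAll ps c hnodup
        have h2 : (sr.map (fun p => p.1)).Perm (rest.items.map (fun p => p.1)) :=
          (PySem.List.sorted_perm _ _ _).map _
        exact (h2.nodup_iff).mpr h1
      have hne : sr.Pairwise (fun a b => a.1 ≠ b.1) :=
        (List.pairwise_map.mp hnd)
      refine ((hpw.and hne).imp_of_mem ?_)
      intro a b ha hb hab
      obtain ⟨hle, hab2⟩ := hab
      have hamem : a.1 ∉ ps :=
        (mem_eraseAll ps c a (((PySem.List.mem_sorted _ _ _ _).mp ha))).2
      have hbmem : b.1 ∉ ps :=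
        (mem_eraseAll ps c b (((PySem.List.mem_sorted _ _ _ _).mp hb))).2
      rw [Prod.Lex.toLex_lt_toLex]
      refine Or.inr ⟨by rw [idx_eq_of_not_mem _ _ hamem, idx_eq_of_not_mem _ _ hbmem], ?_⟩
      rcases lt_or_eq_of_le hle with h | h
      · exact h
      · exfalso
        have := (toLex_inj.mp h)
        exact hab2 (congrArg Prod.snd this)
    · intro a ha b hb
      have ha1 : a.1 ∈ ps := (mem_prefPairs' ps c a ha).2
      have hb1 : b.1 ∉ ps := (mem_eraseAll ps c b ((PySem.List.mem_sorted _ _ _ _).mp hb)).2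
      rw [Prod.Lex.toLex_lt_toLex]
      exact Or.inl (by rw [idx_eq_of_not_mem _ _ hb1]; exact idx_lt_of_mem _ _ ha1)

theorem filterInsert_items (L : List (String × Int)) (o : PySem.Dict String Int)
    (hf : ∀ p ∈ L, o.contains p.1 = false) (hnd : (L.map (fun p => p.1)).Nodup) :
    (L.foldl (fun (d : PySem.Dict String Int) p => if p.2 ≠ 0 then d.insert p.1 p.2 else d) o).items
      = o.items ++ L.filter (fun p => decide (p.2 ≠ 0)) := by
  rw [PySem.List.foldl_ite_eq_foldl_filter (p := fun (p : String × Int) => p.2 ≠ 0)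
      (f := fun (d : PySem.Dict String Int) p => d.insert p.1 p.2)]
  rw [PySem.Dict.items_foldl_insert_fresh _ (fun p => p.1) (fun p => p.2) o
      (fun a ha => hf a (List.mem_of_mem_filter ha))
      (hnd.sublist (List.Sublist.map _ (List.filter_sublist (l := L))))]
  simp

theorem main_eq (cl : List (String × Int)) (ps : List String) :
    ((PySem.List.sorted2 ((ps.foldl PySem.Dict.erase (PySem.Dict.ofList cl)).items)
        (fun item => -item.2) (fun item => item.1)).foldl
      (fun (d : PySem.Dict String Int) p => if p.2 ≠ 0 then d.insert p.1 p.2 else d)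
      (PySem.Dict.mk ((prefPairs (PySem.Dict.ofList cl) ps).filter (fun p => decide (p.2 ≠ 0))))).items
    = ((PySem.List.sorted (PySem.Dict.ofList cl).items
        (fun it => toLex (idx ps it.1, toLex (-it.2, it.1)))).foldl
      (fun (d : PySem.Dict String Int) p => if p.2 ≠ 0 then d.insert p.1 p.2 else d)
      PySem.Dict.empty).items := by
  set c := PySem.Dict.ofList cl with hc
  have hnodup : c.keys.Nodup := PySem.Dict.nodup_keys_ofList cl
  set rest := ps.foldl PySem.Dict.erase c with hrest
  rw [sorted2A_eq_sorted_lex]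
  set SA := PySem.List.sorted rest.items (fun p => toLex (-p.2, p.1)) with hSA
  set SB := PySem.List.sorted c.items (fun it => toLex (idx ps it.1, toLex (-it.2, it.1))) with hSB
  have hSAnd : (SA.map (fun p => p.1)).Nodup := by
    have h1 : rest.keys.Nodup := nodup_keys_eraseAll ps c hnodup
    exact (((PySem.List.sorted_perm _ _ _).map _).nodup_iff).mpr h1
  have hSBnd : (SB.map (fun p => p.1)).Nodup := by
    exact (((PySem.List.sorted_perm _ _ _).map _).nodup_iff).mpr hnodup
  rw [filterInsert_items SA _ ?hf hSAnd, filterInsert_items SB _ (fun p _ => PySem.Dict.contains_empty p.1) hSBnd]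
  case hf =>
    intro p hp
    have hpn : p.1 ∉ ps := (mem_eraseAll ps c p ((PySem.List.mem_sorted _ _ _ _).mp hp)).2
    rw [show (PySem.Dict.mk ((prefPairs c ps).filter (fun p => decide (p.2 ≠ 0)))).contains p.1
        = ((prefPairs c ps).filter (fun p => decide (p.2 ≠ 0))).any (fun q => q.1 == p.1) from rfl]
    rw [List.any_eq_false]
    intro q hq
    have hq1 : q.1 ∈ ps := (mem_prefPairs' ps c q (List.mem_of_mem_filter hq)).2
    have hne : q.1 ≠ p.1 := fun he => hpn (he ▸ hq1)
    simp [hne]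
  have hmain : SB = prefPairs c ps ++ SA := sortedB_eq cl ps
  rw [hmain, List.filter_append]
  rfl

theorem ports_agree (cl : List (String × Int)) (pref : Option (List String)) :
    ordered_counter_py cl pref = ordered_counter_py_alt cl pref := by
  have hA : ordered_counter_py cl pref =
      ((PySem.List.sorted2 (((pref.getD []).foldl PySem.Dict.erase (PySem.Dict.ofList cl)).items)
          (fun item => -item.2) (fun item => item.1)).foldl
        (fun (d : PySem.Dict String Int) p => if p.2 ≠ 0 then d.insert p.1 p.2 else d)
        (PySem.Dict.mk ((prefPairs (PySem.Dict.ofList cl) (pref.getD [])).filter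
          (fun p => decide (p.2 ≠ 0))))).items := by
    cases pref with
    | none => rfl
    | some ps =>
      simp only [ordered_counter_py, Option.getD_some]
      rw [loopA_eq ps (PySem.Dict.ofList cl) PySem.Dict.empty (PySem.Dict.nodup_keys_ofList cl)
        (fun p _ => PySem.Dict.contains_empty p.1)]
      simp [PySem.Dict.empty]
  have hB : ordered_counter_py_alt cl pref =
      ((PySem.List.sorted (PySem.Dict.ofList cl).items
          (fun it => toLex (idx (pref.getD []) it.1, toLex (-it.2, it.1)))).foldl
        (fun (d : PySem.Dict String Int) p => if p.2 ≠ 0 then d.insert p.1 p.2 else d)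
        PySem.Dict.empty).items := by
    simp only [ordered_counter_py_alt]
    have hkey : (fun it : String × Int => toLex
        ((((PySem.List.enumerate (pref.getD [])).foldl
            (fun (d : PySem.Dict String Int) p => d.setdefault p.2 p.1) PySem.Dict.empty).getD it.1
          ((pref.getD []).length : Int)), toLex (-it.2, it.1))) =
        (fun it : String × Int => toLex (idx (pref.getD []) it.1, toLex (-it.2, it.1))) := by
      funext it
      rw [rank_getD]
    rw [hkey]
  rw [hA, main_eq cl (pref.getD []), ← hB]

-- ===== VERDICT (by name: the statement is the Claim_ definition above) =====
theorem ordered_counter_py_spec : Claim_equal_ordered_counter_py := by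
  intro counter_like preferred _
  unfold Spec_ordered_counter_py
  exact ports_agree counter_like preferred
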